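-- pv_equiv track=rewrite | github.com/sophiegehrels/ComputerScience | true_pairs.py | find_set_duplicates
-- ===== SOURCE A (Python) =====
-- from collections import defaultdict
-- from itertools import combinations
--
-- def find_set_duplicates(list_products):
--     # Dictionary to hold the products grouped by their modelID
--     true_duplicates = defaultdict(list)
--
--     # Loop through all products and group them by modelID
--     for idx, product in enumerate(list_products):
--         true_duplicates[product['modelID']].append(idx)
--
--     # Generate true_pairs directly from the true_duplicates
--     true_pairs = set()
--     for indices in true_duplicates.values():
--         if len(indices) > 1:
--             for pair in combinations(indices, 2):
--                 true_pairs.add(tuple(sorted(pair)))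
--
--     return true_pairs
-- ===== SOURCE B (Python) =====
-- def find_set_duplicates(list_products):
--     # Extract the modelID column once; no dict grouping, no itertools.
--     models = [p['modelID'] for p in list_products]
--     out = set()
--     # Distinct modelIDs in first-occurrence order
--     for m in dict.fromkeys(models):
--         idxs = [i for i, x in enumerate(models) if x == m]
--         rest = idxs
--         while len(rest) > 1:
--             i = rest[0]
--             for j in rest[1:]:
--                 out.add((i, j))
--             rest = rest[1:]
--     return out
-- ===== Notes on version B (the rewrite author's own statement) =====
-- stated objective: alternative
-- what changed: Replaced the defaultdict grouping pass plus itertools.combinations with an ordered dedup of the modelID column, a per-model index scan, and a shrinking-suffix loop that pairs the head with every later index; no dict and no combinations are used.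
import Mathlib
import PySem

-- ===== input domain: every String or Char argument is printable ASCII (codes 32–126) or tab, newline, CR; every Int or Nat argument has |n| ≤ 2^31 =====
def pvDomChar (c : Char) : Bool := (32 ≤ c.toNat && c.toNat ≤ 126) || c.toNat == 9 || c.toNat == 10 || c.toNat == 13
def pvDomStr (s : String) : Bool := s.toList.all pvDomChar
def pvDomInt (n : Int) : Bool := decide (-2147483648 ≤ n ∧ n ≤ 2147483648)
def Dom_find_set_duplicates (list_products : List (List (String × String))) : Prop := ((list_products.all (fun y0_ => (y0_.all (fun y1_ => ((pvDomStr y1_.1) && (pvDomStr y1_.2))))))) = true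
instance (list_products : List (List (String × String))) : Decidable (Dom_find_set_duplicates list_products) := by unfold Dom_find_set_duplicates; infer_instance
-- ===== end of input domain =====

-- B replaces the defaultdict grouping + itertools.combinations with an ordered dedup of the
-- modelID column, a per-model index scan and a shrinking-suffix pairing loop (objective: alternative).

-- ===== PORT A =====
def find_set_duplicates (list_products : List (List (String × String))) : List (Int × Int) :=
  -- for idx, product in enumerate(list_products): true_duplicates[product['modelID']].append(idx)
  let true_duplicates : PySem.Dict String (List Int) :=
    (PySem.List.enumerate list_products 0).foldl
      (fun d p => d.modify ((PySem.Dict.ofList p.2).getD "modelID" "") [] (fun l => l ++ [p.1]))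
      PySem.Dict.empty
  -- for indices in true_duplicates.values(): if len > 1: for pair in combinations(indices, 2): add(tuple(sorted(pair)))
  (PySem.Dict.values true_duplicates).foldl
    (fun true_pairs indices =>
      if 1 < indices.length then
        (PySem.List.combinations indices 2).foldl
          (fun true_pairs pair =>
            let sp := PySem.List.sorted pair (fun x => x) false
            -- tuple(sorted(pair)): exact, every member of combinations _ 2 has length 2
            PySem.Set.add true_pairs (PySem.List.pyGetD sp 0 0, PySem.List.pyGetD sp 1 0))
          true_pairs
      else true_pairs)
    PySem.Set.empty

-- ===== PORT B =====
-- while len(rest) > 1: i = rest[0]; for j in rest[1:]: out.add((i, j)); rest = rest[1:]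
def pvPairLoop (rest : List Int) (out : PySem.Set (Int × Int)) : PySem.Set (Int × Int) :=
  if 1 < rest.length then
    pvPairLoop (PySem.List.slice rest (some 1) none)
      ((PySem.List.slice rest (some 1) none).foldl
        (fun out j => PySem.Set.add out (PySem.List.pyGetD rest 0 0, j)) out)
  else out
termination_by rest.length
decreasing_by simp [PySem.List.slice_from_one]; omega

def find_set_duplicates_alt (list_products : List (List (String × String))) : List (Int × Int) :=
  -- models = [p['modelID'] for p in list_products]
  let models : List String :=
    list_products.map (fun p => (PySem.Dict.ofList p).getD "modelID" "")
  -- for m in dict.fromkeys(models): idxs = [i for i, x in enumerate(models) if x == m]; <pair loop>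
  (PySem.List.dedup models).foldl
    (fun out m =>
      let idxs : List Int :=
        ((PySem.List.enumerate models 0).filter (fun q => q.2 == m)).map (·.1)
      pvPairLoop idxs out)
    PySem.Set.empty

-- ===== PRECONDITION & SPEC =====
-- Pre_ excludes exactly the inputs on which the Python raises KeyError: a product without the key 'modelID'.
def Pre_find_set_duplicates (list_products : List (List (String × String))) : Prop :=
  (list_products.all (fun p => (PySem.Dict.ofList p).contains "modelID")) = true
instance (list_products : List (List (String × String))) : Decidable (Pre_find_set_duplicates list_products) := by unfold Pre_find_set_duplicates; infer_instance

def pvWitness_find_set_duplicates : (List (List (String × String))) :=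
  [[("modelID", "a"), ("price", "3")], [("modelID", "b")], [("modelID", "a")]]

def Spec_find_set_duplicates (list_products : List (List (String × String))) (out : List (Int × Int)) : Prop := out = find_set_duplicates_alt list_products
instance (list_products : List (List (String × String))) (out : List (Int × Int)) : Decidable (Spec_find_set_duplicates list_products out) := by unfold Spec_find_set_duplicates; infer_instance

-- ===== CLAIM (what is proved, stated in full; the proofs are below) =====
def Claim_equal_find_set_duplicates : Prop := ∀ (list_products : List (List (String × String))), Dom_find_set_duplicates list_products → Pre_find_set_duplicates list_products → Spec_find_set_duplicates list_products (find_set_duplicates list_products)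

-- ===== LEMMAS AND PROOFS =====

theorem pvPairLoop_short (rest : List Int) (s : PySem.Set (Int × Int)) (h : ¬ 1 < rest.length) :
    pvPairLoop rest s = s := by rw [pvPairLoop]; simp [h]

theorem pvPairLoop_cons (x : Int) (v : List Int) (s : PySem.Set (Int × Int)) (hv : v ≠ []) :
    pvPairLoop (x :: v) s
      = pvPairLoop v (v.foldl (fun s j => PySem.Set.add s (x, j)) s) := by
  have h1 : 1 < (x :: v).length := by cases v <;> simp_all
  rw [pvPairLoop, if_pos h1]
  simp [PySem.List.slice_from_one, PySem.List.pyGetD_ofNat']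

-- sorted of an increasing 2-list is itself
theorem pv_sorted_pair {a b : Int} (hab : a < b) :
    PySem.List.sorted [a, b] (fun x => x) false = [a, b] := by
  apply PySem.List.sorted_eq_of_perm_of_pairwise_lt
  · rfl
  · simp [hab]

-- the per-model loop: A's combinations + sorted-pair adds = B's shrinking-suffix loop
theorem pv_per_model (v : List Int) (hv : v.Pairwise (· < ·)) (s : PySem.Set (Int × Int)) :
    (PySem.List.combinations v 2).foldl
      (fun tp pair =>
        let sp := PySem.List.sorted pair (fun x => x) false
        PySem.Set.add tp (PySem.List.pyGetD sp 0 0, PySem.List.pyGetD sp 1 0))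
      s
    = pvPairLoop v s := by
  induction v generalizing s with
  | nil => simp [PySem.List.combinations_nil_succ, pvPairLoop_short]
  | cons x v ih =>
    have hx : ∀ y ∈ v, x < y := (List.pairwise_cons.mp hv).1
    have hv' : v.Pairwise (· < ·) := (List.pairwise_cons.mp hv).2
    rcases v with _ | ⟨y, w⟩
    · simp [PySem.List.combinations_cons_succ, PySem.List.combinations_nil_succ, pvPairLoop_short]
    · rw [show (2 : Nat) = 1 + 1 from rfl, PySem.List.combinations_cons_succ,
        PySem.List.combinations_one, List.foldl_append, List.map_map, List.foldl_map,
        pvPairLoop_cons x (y :: w) s (by simp)]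
      rw [ih hv']
      congr 1
      apply PySem.List.foldl_congr_mem
      intro s' z hz
      simp only [Function.comp]
      rw [pv_sorted_pair (hx z hz)]
      simp [PySem.List.pyGetD_ofNat']

-- enumerate of a mapped list
theorem pv_enumerate_map {α β : Type} (f : α → β) (xs : List α) (s : Int) :
    PySem.List.enumerate (xs.map f) s = (PySem.List.enumerate xs s).map (fun p => (p.1, f p.2)) := by
  induction xs generalizing s with
  | nil => simp [PySem.List.enumerate_nil]
  | cons x xs ih => simp [PySem.List.enumerate_cons, ih]

-- ===== VERDICT (by name: the statement is the Claim_ definition above) =====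
theorem find_set_duplicates_spec : Claim_equal_find_set_duplicates := by
  intro lp _ _
  unfold Spec_find_set_duplicates find_set_duplicates find_set_duplicates_alt
  simp only []
  set key : List (String × String) → String := fun p => (PySem.Dict.ofList p).getD "modelID" "" with hkey
  set models := lp.map key with hmodels
  set e := PySem.List.enumerate lp 0 with he
  set td : PySem.Dict String (List Int) :=
    e.foldl (fun d p => d.modify (key p.2) [] (fun l => l ++ [p.1])) PySem.Dict.empty with htd
  set idxs : String → List Int := fun m => (e.filter (fun p => key p.2 == m)).map (·.1) with hidxs
  have hmap : e.map (fun p => key p.2) = models := by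
    rw [hmodels, ← PySem.List.map_snd_enumerate lp 0, List.map_map]; rfl
  have hkeys : td.keys = PySem.Set.ofList models := by
    rw [htd, PySem.Dict.keys_foldl_modify_key e (fun p => key p.2) [] (fun _ p l => l ++ [p.1])]
    simp [PySem.Set.update_nil_left, hmap]
  have hnodup : td.keys.Nodup := by rw [hkeys]; exact PySem.Set.nodup_ofList _
  have hgetD : ∀ m, td.getD m [] = idxs m := by
    intro m
    have hfold : ((e.map (fun p => (key p.2, p.1))).foldl
        (fun d q => d.modify q.1 [] (fun l => l ++ [q.2])) PySem.Dict.empty)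
        = (e.foldl (fun d p => d.modify (key p.2) [] (fun l => l ++ [p.1])) PySem.Dict.empty) := by
      rw [List.foldl_map]
    rw [htd, ← hfold, PySem.Dict.getD_foldl_modify_append]
    simp [List.filter_map, List.map_map, hidxs, Function.comp_def]
  have hvals : td.values = td.keys.map (fun m => td.getD m []) :=
    PySem.Dict.values_eq_map_keys td hnodup []
  have hpw : ∀ m, (idxs m).Pairwise (· < ·) := by
    intro m
    rw [hidxs]
    exact List.pairwise_map.mpr (((PySem.List.pairwise_lt_enumerate lp 0).filter _))
  have hB : PySem.List.dedup models = PySem.Set.ofList models := PySem.List.dedup_eq_ofList models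
  have hBidx : ∀ m, ((PySem.List.enumerate models 0).filter (fun q => q.2 == m)).map (·.1) = idxs m := by
    intro m
    rw [hmodels, pv_enumerate_map, List.filter_map, List.map_map]
    rfl
  rw [hvals, hkeys, List.foldl_map, hB]
  apply PySem.List.foldl_congr_mem
  intro acc m hm
  rw [hgetD, hBidx]
  by_cases hlen : 1 < (idxs m).length
  · rw [if_pos hlen, pv_per_model _ (hpw m)]
  · rw [if_neg hlen, pvPairLoop_short _ _ hlen]
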